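-- pv_equiv track=rewrite | github.com/nami4mo/competitive-programming-problems | practice/abc001-041/abc009_4.py | pow_mat
-- ===== SOURCE A (Python) =====
-- def multi_mat(x,y,mod):
--     row=len(x)
--     mid=len(y) # len(x[0])
--     col=len(y[0])
--     res=[[0]*col for _ in range(row)]
--     for i in range(row):
--         for j in range(col):
--             for k in range(mid):
--                 res[i][j]^=x[i][k]&y[k][j]
--     return res
--
-- def pow_mat(x,n,mod):
--     size=len(x)
--     res=[[0]*size for _ in range(size)]
--     for i in range(size): res[i][i]=pow(2,32)-1
--     if n == 0: return res
--     xk = x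
--     while n > 1:
--         if n%2 != 0:
--             res = multi_mat(res,xk,mod)
--         xk = multi_mat(xk,xk,mod)
--         n >>= 1
--     return multi_mat(res,xk,mod)
-- ===== SOURCE B (Python) =====
-- def multi_mat(x,y,mod):
--     row=len(x)
--     mid=len(y) # len(x[0])
--     col=len(y[0])
--     res=[[0]*col for _ in range(row)]
--     for i in range(row):
--         for j in range(col):
--             for k in range(mid):
--                 res[i][j]^=x[i][k]&y[k][j]
--     return res
--
-- def pow_mat(x,n,mod):
--     size=len(x)
--     res=[[0]*size for _ in range(size)]
--     for i in range(size): res[i][i]=pow(2,32)-1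
--     if n==0: return res
--     half=pow_mat(x,n//2,mod)
--     sq=multi_mat(half,half,mod)
--     return multi_mat(sq,x,mod) if n%2!=0 else sq
-- ===== Notes on version B (the rewrite author's own statement) =====
-- stated objective: alternative
-- what changed: pow_mat's iterative bit-scanning while-loop (accumulator res, repeatedly squared xk) is replaced by a top-down recursive divide-and-conquer: pow_mat(x,n) = square(pow_mat(x,n//2)) times x if n is odd, with the identity as the n==0 base case; multi_mat is kept unchanged.
-- outside the precondition, e.g. on pow_mat([[1]], -3, 0): A returns [[1]], B raises RecursionError
import Mathlib
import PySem

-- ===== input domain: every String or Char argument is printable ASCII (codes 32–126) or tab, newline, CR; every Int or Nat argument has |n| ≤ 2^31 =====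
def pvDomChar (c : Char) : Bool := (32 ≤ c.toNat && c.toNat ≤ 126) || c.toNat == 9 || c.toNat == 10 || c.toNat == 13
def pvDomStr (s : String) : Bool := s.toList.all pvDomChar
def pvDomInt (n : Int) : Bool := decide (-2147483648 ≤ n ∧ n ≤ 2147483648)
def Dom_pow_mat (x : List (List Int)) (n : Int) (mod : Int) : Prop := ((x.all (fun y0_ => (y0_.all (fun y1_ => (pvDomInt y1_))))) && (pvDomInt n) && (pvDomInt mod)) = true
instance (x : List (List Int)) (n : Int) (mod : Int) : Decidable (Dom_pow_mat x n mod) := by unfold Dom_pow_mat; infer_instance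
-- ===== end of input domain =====

-- B replaces A's iterative bit-scanning loop by a top-down recursive halving of n (same cost);
-- the equivalence below is about the return value (neither Python mutates its arguments).

-- ===== PORT A =====
-- multi_mat, shared verbatim by both Pythons.  len(y[0]) raises IndexError in Python when y = []
-- (such inputs are outside Pre_, headD [] is used there); the getD indexings are exact for the
-- in-range accesses that Pre_ admits.
def pvMulMat (x y : List (List Int)) (mod : Int) : List (List Int) :=
  (List.range x.length).map (fun i =>
    (List.range ((y.headD []).length)).map (fun j =>
      (List.range y.length).foldl (fun acc k =>
        PySem.Int.bxor acc (PySem.Int.band ((x.getD i []).getD k 0) ((y.getD k []).getD j 0))) 0))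

-- res = zero matrix, then res[i][i] = pow(2,32)-1 (both Pythons build it with these two lines)
def pvIdent (size : Nat) : List (List Int) :=
  (List.range size).map (fun i => (List.range size).map (fun j => if j = i then (4294967295 : Int) else 0))

-- A's while-loop: 'while n > 1: if n%2 != 0: res = multi_mat(res,xk,mod); xk = multi_mat(xk,xk,mod); n >>= 1'
-- followed by 'return multi_mat(res,xk,mod)'
def pvPowLoopA (res xk : List (List Int)) (n : Int) (mod : Int) : List (List Int) :=
  if h : 1 < n then
    pvPowLoopA (if PySem.Int.mod n 2 ≠ 0 then pvMulMat res xk mod else res)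
      (pvMulMat xk xk mod) (PySem.Int.floordiv n 2) mod
  else pvMulMat res xk mod
termination_by n.toNat
decreasing_by
  have hf := PySem.Int.floordiv_eq_ediv_of_pos (a := n) (b := 2) (by omega)
  omega

def pow_mat (x : List (List Int)) (n : Int) (mod : Int) : List (List Int) :=
  if n = 0 then pvIdent x.length else pvPowLoopA (pvIdent x.length) x n mod

-- ===== PORT B =====
-- Source B: identity base case for n == 0, else half = pow_mat(x, n//2, mod); sq = half*half;
-- one extra product with x when n is odd.  For n < 0 Python B recurses forever (RecursionError);
-- n < 0 is outside Pre_, the n ≤ 0 guard only makes the recursion total.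
def pow_mat_alt (x : List (List Int)) (n : Int) (mod : Int) : List (List Int) :=
  if h : n ≤ 0 then pvIdent x.length
  else
    let half := pow_mat_alt x (PySem.Int.floordiv n 2) mod
    let sq := pvMulMat half half mod
    if PySem.Int.mod n 2 ≠ 0 then pvMulMat sq x mod else sq
termination_by n.toNat
decreasing_by
  have hf := PySem.Int.floordiv_eq_ediv_of_pos (a := n) (b := 2) (by omega)
  omega

-- ===== PRECONDITION & SPEC =====
-- Pre_ is exactly the set of inputs on which Python A returns, minus negative n: for n ≥ 1 A raises
-- IndexError unless x is nonempty, every row is at least as long as row 0, and (when n ≥ 2, so that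
-- xk gets squared) row 0 is at least as long as x; negative n is excluded because there A's skipped
-- while-loop accidentally returns multi_mat(identity, x, mod) while B's recursion never terminates
-- (RecursionError) — see the cite in claim.json.
def Pre_pow_mat (x : List (List Int)) (n : Int) (mod : Int) : Prop :=
  0 ≤ n ∧ (n = 0 ∨ (x ≠ [] ∧ (∀ r ∈ x, (x.headD []).length ≤ r.length) ∧
    (n = 1 ∨ x.length ≤ (x.headD []).length ∨ (x.headD []).length = 0)))

instance (x : List (List Int)) (n : Int) (mod : Int) : Decidable (Pre_pow_mat x n mod) := by
  unfold Pre_pow_mat; infer_instance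

def pvWitness_pow_mat : List (List Int) × Int × Int := ([[1, 2], [3, 4]], 3, 0)

def Spec_pow_mat (x : List (List Int)) (n : Int) (mod : Int) (out : List (List Int)) : Prop :=
  out = pow_mat_alt x n mod
instance (x : List (List Int)) (n : Int) (mod : Int) (out : List (List Int)) : Decidable (Spec_pow_mat x n mod out) := by
  unfold Spec_pow_mat; infer_instance

-- ===== CLAIM (what is proved, stated in full; the proofs are below) =====
def Claim_equal_pow_mat : Prop := ∀ (x : List (List Int)) (n : Int) (mod : Int),
  Dom_pow_mat x n mod → Pre_pow_mat x n mod → Spec_pow_mat x n mod (pow_mat x n mod)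

-- ===== LEMMAS AND PROOFS =====

-- proof-side views of the ports: entries, rectangular builders, xor-sums
def pvE (a : List (List Int)) (i j : Nat) : Int := (a.getD i []).getD j 0
def pvS (m : Nat) (t : Nat → Int) : Int := (List.range m).foldl (fun acc k => PySem.Int.bxor acc (t k)) 0
def pvMkR (r c : Nat) (f : Nat → Nat → Int) : List (List Int) :=
  (List.range r).map (fun i => (List.range c).map (fun j => f i j))
def pvMask (r c : Nat) (a : List (List Int)) : List (List Int) :=
  pvMkR r c (fun i j => PySem.Int.band (pvE a i j) 4294967295)
def pvPw (a : List (List Int)) (mod : Int) : Nat → List (List Int)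
  | 0 => a
  | t + 1 => pvMulMat (pvPw a mod t) a mod

-- ===== bitwise groundwork: Python & and ^ on arbitrary ints, via testBit =====
theorem pvNatSubAnd_testBit : ∀ (m : Nat), ∀ (n k : Nat),
    (m - (m &&& n)).testBit k = (m.testBit k && !(n.testBit k)) := by
  intro m
  induction m using Nat.strong_induction_on with
  | _ m IH =>
    intro n k
    rcases Nat.eq_zero_or_pos m with hm | hm
    · subst hm; simp [Nat.zero_and, Nat.zero_testBit]
    · have h1 : m &&& n ≤ m := Nat.and_le_left
      have h2 : (m &&& n) / 2 = m / 2 &&& n / 2 := Nat.and_div_two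
      have h3 : m / 2 &&& n / 2 ≤ m / 2 := Nat.and_le_left
      have h5 := (Nat.and_mod_two_eq_one (a := m) (b := n))
      have h6 := Nat.mod_two_eq_zero_or_one (m &&& n)
      have hrec : m - (m &&& n) = 2 * (m / 2 - (m / 2 &&& n / 2)) + (m % 2 - (m &&& n) % 2) := by
        omega
      cases k with
      | zero =>
        rw [Nat.testBit_zero, Nat.testBit_zero, Nat.testBit_zero]
        have hkey : (m - (m &&& n)) % 2 = 1 ↔ (m % 2 = 1 ∧ ¬ n % 2 = 1) := by omega
        rw [Bool.eq_iff_iff]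
        simp [hkey]
      | succ k =>
        rw [Nat.testBit_add_one, Nat.testBit_add_one, Nat.testBit_add_one]
        have hdiv : (m - (m &&& n)) / 2 = m / 2 - (m / 2 &&& n / 2) := by
          rw [hrec]; omega
        rw [hdiv]
        exact IH (m / 2) (by omega) (n / 2) k


theorem pvTbCoe (n : Nat) (k : Nat) : ((n : Int)).testBit k = n.testBit k := rfl
theorem pvTbNegSucc (n : Nat) (k : Nat) : (Int.negSucc n).testBit k = !(n.testBit k) := rfl

theorem pvBand_testBit (a b : Int) (k : Nat) :
    (PySem.Int.band a b).testBit k = (a.testBit k && b.testBit k) := by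
  unfold PySem.Int.band
  by_cases ha : 0 ≤ a <;> by_cases hb : 0 ≤ b <;>
    simp only [ha, hb, if_pos, if_neg, not_false_iff]
  · rw [show a = ((a.toNat : Nat) : Int) by omega, show b = ((b.toNat : Nat) : Int) by omega]
    simp only [Int.toNat_natCast, pvTbCoe]
    exact Nat.testBit_and _ _ _
  · rw [show b = Int.negSucc ((-b - 1).toNat) by omega, show a = ((a.toNat : Nat) : Int) by omega]
    simp only [Int.toNat_natCast, pvTbCoe, pvTbNegSucc, pvNatSubAnd_testBit]
    rw [show (-(Int.negSucc ((-b - 1).toNat)) - 1).toNat = (-b - 1).toNat by omega]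
  · rw [show a = Int.negSucc ((-a - 1).toNat) by omega, show b = ((b.toNat : Nat) : Int) by omega]
    simp only [Int.toNat_natCast, pvTbCoe, pvTbNegSucc, pvNatSubAnd_testBit]
    rw [show (-(Int.negSucc ((-a - 1).toNat)) - 1).toNat = (-a - 1).toNat by omega]
    cases (b.toNat).testBit k <;> cases ((-a - 1).toNat).testBit k <;> rfl
  · rw [show a = Int.negSucc ((-a - 1).toNat) by omega, show b = Int.negSucc ((-b - 1).toNat) by omega]
    rw [show (-(Int.negSucc ((-a - 1).toNat)) - 1).toNat = (-a - 1).toNat by omega,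
        show (-(Int.negSucc ((-b - 1).toNat)) - 1).toNat = (-b - 1).toNat by omega]
    rw [show (-(↑((-a - 1).toNat ||| (-b - 1).toNat) : Int) - 1)
        = Int.negSucc ((-a - 1).toNat ||| (-b - 1).toNat) by omega]
    simp only [pvTbNegSucc, Nat.testBit_or]
    cases ((-a - 1).toNat).testBit k <;> cases ((-b - 1).toNat).testBit k <;> rfl

theorem pvBxor_testBit (a b : Int) (k : Nat) :
    (PySem.Int.bxor a b).testBit k = (a.testBit k ^^ b.testBit k) := by
  unfold PySem.Int.bxor
  by_cases ha : 0 ≤ a <;> by_cases hb : 0 ≤ b <;>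
    simp only [ha, hb, if_pos, if_neg, not_false_iff]
  · rw [show a = ((a.toNat : Nat) : Int) by omega, show b = ((b.toNat : Nat) : Int) by omega]
    simp only [Int.toNat_natCast, pvTbCoe]
    exact Nat.testBit_xor _ _ _
  · rw [show b = Int.negSucc ((-b - 1).toNat) by omega, show a = ((a.toNat : Nat) : Int) by omega]
    rw [show (-(Int.negSucc ((-b - 1).toNat)) - 1).toNat = (-b - 1).toNat by omega]
    rw [show (-(↑(((a.toNat : Nat) : Int).toNat ^^^ (-b - 1).toNat) : Int) - 1)
        = Int.negSucc (((a.toNat : Nat) : Int).toNat ^^^ (-b - 1).toNat) by omega]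
    simp only [Int.toNat_natCast, pvTbCoe, pvTbNegSucc, Nat.testBit_xor]
    cases (a.toNat).testBit k <;> cases ((-b - 1).toNat).testBit k <;> rfl
  · rw [show a = Int.negSucc ((-a - 1).toNat) by omega, show b = ((b.toNat : Nat) : Int) by omega]
    rw [show (-(Int.negSucc ((-a - 1).toNat)) - 1).toNat = (-a - 1).toNat by omega]
    rw [show (-(↑((-a - 1).toNat ^^^ ((b.toNat : Nat) : Int).toNat) : Int) - 1)
        = Int.negSucc ((-a - 1).toNat ^^^ ((b.toNat : Nat) : Int).toNat) by omega]
    simp only [Int.toNat_natCast, pvTbCoe, pvTbNegSucc, Nat.testBit_xor]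
    cases ((-a - 1).toNat).testBit k <;> cases (b.toNat).testBit k <;> rfl
  · rw [show a = Int.negSucc ((-a - 1).toNat) by omega, show b = Int.negSucc ((-b - 1).toNat) by omega]
    rw [show (-(Int.negSucc ((-a - 1).toNat)) - 1).toNat = (-a - 1).toNat by omega,
        show (-(Int.negSucc ((-b - 1).toNat)) - 1).toNat = (-b - 1).toNat by omega]
    simp only [pvTbCoe, pvTbNegSucc, Nat.testBit_xor]
    cases ((-a - 1).toNat).testBit k <;> cases ((-b - 1).toNat).testBit k <;> rfl

theorem pvIntExt {a b : Int} (h : ∀ k, a.testBit k = b.testBit k) : a = b := by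
  have hfin : ∀ (p q : Nat), (∀ k, (p : Int).testBit k = (Int.negSucc q).testBit k) → False := by
    intro p q hpq
    have := hpq (p + q)
    rw [show ((p : Int)).testBit (p + q) = p.testBit (p + q) from rfl,
        show (Int.negSucc q).testBit (p + q) = !(q.testBit (p + q)) from rfl] at this
    rw [Nat.testBit_lt_two_pow (Nat.lt_of_lt_of_le Nat.lt_two_pow_self
          (Nat.pow_le_pow_right (by norm_num) (Nat.le_add_right p q))),
        Nat.testBit_lt_two_pow (Nat.lt_of_lt_of_le Nat.lt_two_pow_self
          (Nat.pow_le_pow_right (by norm_num) (Nat.le_add_left q p)))] at this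
    simp at this
  cases a with
  | ofNat m =>
    cases b with
    | ofNat n =>
      congr 1
      exact Nat.eq_of_testBit_eq fun k => h k
    | negSucc n => exact absurd (fun k => h k) (fun hk => hfin m n hk)
  | negSucc m =>
    cases b with
    | ofNat n => exact absurd (fun k => (h k).symm) (fun hk => hfin n m hk)
    | negSucc n =>
      congr 1
      refine Nat.eq_of_testBit_eq fun k => ?_
      have := h k
      rw [show (Int.negSucc m).testBit k = !(m.testBit k) from rfl,
          show (Int.negSucc n).testBit k = !(n.testBit k) from rfl] at this
      cases hm : m.testBit k <;> cases hn : n.testBit k <;> simp [hm, hn] at this ⊢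

theorem pvBand_assoc (a b c : Int) :
    PySem.Int.band (PySem.Int.band a b) c = PySem.Int.band a (PySem.Int.band b c) := by
  apply pvIntExt; intro k
  simp only [pvBand_testBit, Bool.and_assoc]

theorem pvBxor_assoc (a b c : Int) :
    PySem.Int.bxor (PySem.Int.bxor a b) c = PySem.Int.bxor a (PySem.Int.bxor b c) := by
  apply pvIntExt; intro k
  simp only [pvBxor_testBit, Bool.xor_assoc]

theorem pvBand_bxor (a b c : Int) :
    PySem.Int.band (PySem.Int.bxor a b) c
      = PySem.Int.bxor (PySem.Int.band a c) (PySem.Int.band b c) := by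
  apply pvIntExt; intro k
  simp only [pvBand_testBit, pvBxor_testBit]
  cases a.testBit k <;> cases b.testBit k <;> cases c.testBit k <;> rfl

theorem pvZero_band (a : Int) : PySem.Int.band 0 a = 0 := by
  rw [PySem.Int.band_comm]; exact PySem.Int.band_zero a

theorem pvZero_bxor (a : Int) : PySem.Int.bxor 0 a = a := by
  rw [PySem.Int.bxor_comm]; exact PySem.Int.bxor_zero a

-- ===== pvS layer =====
theorem pvS_zero (t : Nat → Int) : pvS 0 t = 0 := rfl

theorem pvS_succ (m : Nat) (t : Nat → Int) :
    pvS (m + 1) t = PySem.Int.bxor (pvS m t) (t m) := by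
  simp [pvS, List.range_succ]

theorem pvS_congr {m : Nat} {t u : Nat → Int} (h : ∀ k, k < m → t k = u k) :
    pvS m t = pvS m u := by
  induction m with
  | zero => rfl
  | succ m ih =>
    rw [pvS_succ, pvS_succ, ih (fun k hk => h k (by omega)), h m (by omega)]

theorem pvS_zero_fun (m : Nat) : pvS m (fun _ => 0) = 0 := by
  induction m with
  | zero => rfl
  | succ m ih => rw [pvS_succ, ih, PySem.Int.bxor_zero]

theorem pvS_bxor (m : Nat) (t u : Nat → Int) :
    pvS m (fun k => PySem.Int.bxor (t k) (u k))
      = PySem.Int.bxor (pvS m t) (pvS m u) := by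
  induction m with
  | zero => simp [pvS_zero]
  | succ m ih =>
    rw [pvS_succ, pvS_succ, pvS_succ, ih]
    rw [pvBxor_assoc (pvS m t) (pvS m u) _, ← pvBxor_assoc (pvS m u) (t m) (u m),
        PySem.Int.bxor_comm (pvS m u) (t m), pvBxor_assoc (t m) (pvS m u) (u m),
        ← pvBxor_assoc (pvS m t) (t m) _]

theorem pvS_band_right (m : Nat) (t : Nat → Int) (c : Int) :
    PySem.Int.band (pvS m t) c = pvS m (fun k => PySem.Int.band (t k) c) := by
  induction m with
  | zero => rw [pvS_zero, pvS_zero, pvZero_band]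
  | succ m ih => rw [pvS_succ, pvS_succ, pvBand_bxor, ih]

theorem pvS_band_left (m : Nat) (t : Nat → Int) (c : Int) :
    PySem.Int.band c (pvS m t) = pvS m (fun k => PySem.Int.band c (t k)) := by
  rw [PySem.Int.band_comm, pvS_band_right]
  exact pvS_congr (fun k _ => PySem.Int.band_comm _ _)

theorem pvS_swap (m n : Nat) (u : Nat → Nat → Int) :
    pvS m (fun k => pvS n (fun j => u k j)) = pvS n (fun j => pvS m (fun k => u k j)) := by
  induction m with
  | zero => simp [pvS_zero, pvS_zero_fun]
  | succ m ih =>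
    rw [pvS_succ, ih, ← pvS_bxor]
    exact pvS_congr (fun j _ => (pvS_succ m (fun k => u k j)).symm)

theorem pvS_single : ∀ (m j : Nat) (t : Nat → Int), j < m →
    (∀ k, k < m → k ≠ j → t k = 0) → pvS m t = t j := by
  intro m
  induction m with
  | zero => intro j t hj _; omega
  | succ m ih =>
    intro j t hj h0
    rw [pvS_succ]
    by_cases hje : j = m
    · have hz : pvS m t = 0 := by
        rw [pvS_congr (fun k hk => h0 k (by omega) (by omega))]
        exact pvS_zero_fun m
      rw [hz, pvZero_bxor, hje]
    · rw [h0 m (by omega) (fun h => hje h.symm), PySem.Int.bxor_zero,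
        ih j t (by omega) (fun k hk hkj => h0 k (by omega) hkj)]

-- ===== pvMkR / pvE layer =====
theorem pvMkR_length (r c : Nat) (f : Nat → Nat → Int) : (pvMkR r c f).length = r := by
  simp [pvMkR]

theorem pvE_mkR (r c : Nat) (f : Nat → Nat → Int) (i j : Nat) :
    pvE (pvMkR r c f) i j = if i < r ∧ j < c then f i j else 0 := by
  simp only [pvE, pvMkR, List.getD_eq_getElem?_getD, List.getElem?_map]
  by_cases hi : i < r <;> by_cases hj : j < c <;> simp [hi, hj]

theorem pvMkR_congr {r c : Nat} {f g : Nat → Nat → Int}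
    (h : ∀ i, i < r → ∀ j, j < c → f i j = g i j) : pvMkR r c f = pvMkR r c g := by
  unfold pvMkR
  refine List.map_congr_left (fun i hi => ?_)
  refine List.map_congr_left (fun j hj => ?_)
  exact h i (List.mem_range.mp hi) j (List.mem_range.mp hj)

theorem pvMkR_headD (r c : Nat) (f : Nat → Nat → Int) (hr : 0 < r) :
    ((pvMkR r c f).headD []).length = c := by
  cases r with
  | zero => omega
  | succ r => simp [pvMkR, List.range_succ_eq_map]

theorem pvMulMat_eq (a b : List (List Int)) (mod : Int) :
    pvMulMat a b mod = pvMkR a.length ((b.headD []).length)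
      (fun i j => pvS b.length (fun k => PySem.Int.band (pvE a i k) (pvE b k j))) := rfl

theorem pvIdent_eq (s : Nat) :
    pvIdent s = pvMkR s s (fun i j => if j = i then (4294967295 : Int) else 0) := rfl

-- ===== matrix algebra =====
theorem pvMulMat_length (a b : List (List Int)) (mod : Int) :
    (pvMulMat a b mod).length = a.length := by
  rw [pvMulMat_eq]; exact pvMkR_length _ _ _

theorem pvMulMat_headD (a b : List (List Int)) (mod : Int) (ha : 0 < a.length) :
    ((pvMulMat a b mod).headD []).length = (b.headD []).length := by
  rw [pvMulMat_eq]; exact pvMkR_headD _ _ _ ha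

theorem pvAssoc (a b c : List (List Int)) (mod : Int) (hb : 0 < b.length)
    (hmid : ∀ l k, l < b.length → (b.headD []).length ≤ k → k < c.length → pvE b l k = 0) :
    pvMulMat (pvMulMat a b mod) c mod = pvMulMat a (pvMulMat b c mod) mod := by
  rw [pvMulMat_eq b c, pvMulMat_eq (pvMulMat a b mod) c, pvMulMat_eq a b,
      pvMulMat_eq a (pvMkR b.length ((c.headD []).length) _)]
  rw [pvMkR_length, pvMkR_length, pvMkR_headD _ _ _ hb]
  apply pvMkR_congr
  intro i hi j hj
  calc pvS c.length (fun k =>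
        PySem.Int.band (pvE (pvMkR a.length ((b.headD []).length)
          (fun i j => pvS b.length fun k => PySem.Int.band (pvE a i k) (pvE b k j))) i k)
          (pvE c k j))
      = pvS c.length (fun k => if k < (b.headD []).length then
          pvS b.length (fun l => PySem.Int.band (PySem.Int.band (pvE a i l) (pvE b l k)) (pvE c k j))
        else 0) := by
        apply pvS_congr
        intro k hk
        rw [pvE_mkR]
        by_cases hkc : k < (b.headD []).length
        · simp only [hi, hkc, and_true, if_true]
          rw [pvS_band_right]
        · simp only [hkc, and_false, if_false]
          rw [pvZero_band]
    _ = pvS c.length (fun k =>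
          pvS b.length (fun l => PySem.Int.band (PySem.Int.band (pvE a i l) (pvE b l k)) (pvE c k j))) := by
        apply pvS_congr
        intro k hk
        by_cases hkc : k < (b.headD []).length
        · rw [if_pos hkc]
        · rw [if_neg hkc]
          rw [pvS_congr (fun l hl => ?_), pvS_zero_fun]
          rw [hmid l k hl (by omega) hk, PySem.Int.band_zero, pvZero_band]
    _ = pvS b.length (fun l =>
          pvS c.length (fun k => PySem.Int.band (PySem.Int.band (pvE a i l) (pvE b l k)) (pvE c k j))) := by
        rw [pvS_swap]
    _ = pvS b.length (fun l => PySem.Int.band (pvE a i l)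
          (pvE (pvMkR b.length ((c.headD []).length)
            (fun i j => pvS c.length fun k => PySem.Int.band (pvE b i k) (pvE c k j))) l j)) := by
        apply pvS_congr
        intro l hl
        rw [pvE_mkR]
        simp only [hl, hj, and_true, if_true]
        rw [pvS_band_left]
        apply pvS_congr
        intro k hk
        rw [pvBand_assoc]

theorem pvMask_length (r c : Nat) (a : List (List Int)) : (pvMask r c a).length = r :=
  pvMkR_length _ _ _

theorem pvMask_headD (r c : Nat) (a : List (List Int)) (hr : 0 < r) :
    ((pvMask r c a).headD []).length = c := pvMkR_headD _ _ _ hr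

theorem pvMask_mask (r c : Nat) (a : List (List Int)) :
    pvMask r c (pvMask r c a) = pvMask r c a := by
  unfold pvMask
  apply pvMkR_congr
  intro i hi j hj
  rw [pvE_mkR]
  simp only [hi, hj, and_self, if_true]
  rw [pvBand_assoc, PySem.Int.band_self]

theorem pvMaskPushL (a b : List (List Int)) (mod : Int) (ca : Nat)
    (hlb : b.length ≤ ca) :
    pvMulMat (pvMask a.length ca a) b mod
      = pvMask a.length ((b.headD []).length) (pvMulMat a b mod) := by
  rw [pvMulMat_eq (pvMask a.length ca a) b, pvMask_length]
  unfold pvMask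
  rw [pvMulMat_eq a b]
  apply pvMkR_congr
  intro i hi j hj
  rw [pvE_mkR]
  simp only [hi, hj, and_true, if_true]
  rw [pvS_band_right]
  apply pvS_congr
  intro k hk
  rw [pvE_mkR]
  simp only [hi, (by omega : k < ca), and_true, if_true]
  rw [pvBand_assoc, pvBand_assoc, PySem.Int.band_comm 4294967295 (pvE b k j)]

theorem pvMaskPushR (a b : List (List Int)) (mod : Int) (hb : 0 < b.length) :
    pvMulMat a (pvMask b.length ((b.headD []).length) b) mod
      = pvMask a.length ((b.headD []).length) (pvMulMat a b mod) := by
  rw [pvMulMat_eq a (pvMask b.length ((b.headD []).length) b), pvMask_length,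
      pvMask_headD _ _ _ hb]
  unfold pvMask
  rw [pvMulMat_eq a b]
  apply pvMkR_congr
  intro i hi j hj
  rw [pvE_mkR]
  simp only [hi, hj, and_true, if_true]
  rw [pvS_band_right]
  apply pvS_congr
  intro k hk
  rw [pvE_mkR]
  simp only [hk, hj, and_true, if_true]
  rw [pvBand_assoc]

theorem pvIdent_headD (s : Nat) (hs : 0 < s) : ((pvIdent s).headD []).length = s := by
  rw [pvIdent_eq]; exact pvMkR_headD _ _ _ hs

theorem pvMulIdentL (b : List (List Int)) (mod : Int) (s : Nat) (hb : b.length = s) (hs : 0 < s) :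
    pvMulMat (pvIdent s) b mod = pvMask s ((b.headD []).length) b := by
  rw [pvMulMat_eq, pvIdent_eq, pvMkR_length, hb]
  unfold pvMask
  apply pvMkR_congr
  intro i hi j hj
  rw [pvS_single s i _ hi]
  · rw [pvE_mkR]
    simp only [hi, and_self, if_true]
    rw [PySem.Int.band_comm]
  · intro k hk hki
    rw [pvE_mkR]
    simp only [hk, hi, and_self, if_true]
    rw [if_neg hki, pvZero_band]

theorem pvMask_ident (s : Nat) : pvMask s s (pvIdent s) = pvIdent s := by
  rw [pvIdent_eq]
  unfold pvMask
  apply pvMkR_congr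
  intro i hi j hj
  rw [pvE_mkR]
  simp only [hi, hj, and_self, if_true]
  by_cases hji : j = i
  · rw [if_pos hji]
    exact PySem.Int.band_self _
  · rw [if_neg hji]
    exact pvZero_band _

-- ===== powers of the base matrix (pvPw a mod t = a * a * … * a, t+1 factors, left-associated) =====
theorem pvPw_length (a : List (List Int)) (mod : Int) (t : Nat) :
    (pvPw a mod t).length = a.length := by
  induction t with
  | zero => rfl
  | succ t ih => rw [pvPw, pvMulMat_length, ih]

theorem pvPw_headD (a : List (List Int)) (mod : Int) (ha : 0 < a.length) (t : Nat) :
    ((pvPw a mod t).headD []).length = (a.headD []).length := by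
  cases t with
  | zero => rfl
  | succ t => rw [pvPw, pvMulMat_headD _ _ _ (by rw [pvPw_length]; exact ha)]

theorem pvPw_mid (a : List (List Int)) (mod : Int)
    (hA : ∀ l k, (a.headD []).length ≤ k → k < a.length → pvE a l k = 0) (v : Nat) :
    ∀ l k, (a.headD []).length ≤ k → k < a.length → pvE (pvPw a mod v) l k = 0 := by
  cases v with
  | zero => exact hA
  | succ v =>
    intro l k hk1 hk2
    rw [pvPw, pvMulMat_eq, pvE_mkR]
    rw [if_neg (fun h => by omega)]

theorem pvPw_add (a : List (List Int)) (mod : Int) (ha : 0 < a.length)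
    (hA : ∀ l k, (a.headD []).length ≤ k → k < a.length → pvE a l k = 0) (u : Nat) :
    ∀ v, pvMulMat (pvPw a mod u) (pvPw a mod v) mod = pvPw a mod (u + v + 1) := by
  intro v
  induction v with
  | zero => rfl
  | succ v ih =>
    rw [pvPw]
    rw [← pvAssoc (pvPw a mod u) (pvPw a mod v) a mod
        (by rw [pvPw_length]; exact ha)
        (fun l k _ hk1 hk2 => pvPw_mid a mod hA v l k
          (by rwa [pvPw_headD a mod ha v] at hk1) hk2)]
    rw [ih]
    rfl

theorem pvPw_sq (a : List (List Int)) (mod : Int) (ha : 0 < a.length)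
    (hA : ∀ l k, (a.headD []).length ≤ k → k < a.length → pvE a l k = 0) :
    ∀ t, pvPw (pvMulMat a a mod) mod t = pvPw a mod (2 * t + 1) := by
  intro t
  induction t with
  | zero => rfl
  | succ t ih =>
    rw [pvPw, ih]
    rw [← pvAssoc (pvPw a mod (2 * t + 1)) a a mod ha (fun l k _ hk1 hk2 => hA l k hk1 hk2)]
    show pvMulMat (pvPw a mod (2 * t + 1 + 1)) a mod = _
    rfl

theorem pvIdent_length (s : Nat) : (pvIdent s).length = s := by
  rw [pvIdent_eq]; exact pvMkR_length _ _ _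

-- with an empty first row every product has zero columns: both programs return x.length empty rows
theorem pvLoopZeroCols (mod : Int) : ∀ (N : Nat) (n : Int), n.toNat = N → 1 ≤ n →
    ∀ (res xk : List (List Int)), 0 < xk.length → (xk.headD []).length = 0 →
    res.length = xk.length →
    pvPowLoopA res xk n mod = pvMkR xk.length 0 (fun _ _ => 0) := by
  intro N
  induction N using Nat.strong_induction_on with
  | _ N IH =>
    intro n hN h1 res xk hxk hc hr
    rw [pvPowLoopA]
    by_cases h2 : 1 < n
    · rw [dif_pos h2]
      have hq2 : PySem.Int.floordiv n 2 = n / 2 := PySem.Int.floordiv_eq_ediv_of_pos (by omega)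
      rw [IH (PySem.Int.floordiv n 2).toNat (by omega) _ rfl (by omega) _
          (pvMulMat xk xk mod) (by rw [pvMulMat_length]; exact hxk)
          (by rw [pvMulMat_headD _ _ _ hxk]; exact hc)
          (by rw [pvMulMat_length]
              by_cases hodd : PySem.Int.mod n 2 ≠ 0
              · rw [if_pos hodd, pvMulMat_length, hr]
              · rw [if_neg hodd, hr])]
      rw [pvMulMat_length]
    · rw [dif_neg h2, pvMulMat_eq, hc, hr]
      exact pvMkR_congr (fun i _ j hj => by omega)

theorem pvAltZeroCols (mod : Int) : ∀ (N : Nat) (n : Int), n.toNat = N → 1 ≤ n →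
    ∀ (x : List (List Int)), 0 < x.length → (x.headD []).length = 0 →
    pow_mat_alt x n mod = pvMkR x.length 0 (fun _ _ => 0) := by
  intro N
  induction N using Nat.strong_induction_on with
  | _ N IH =>
    intro n hN h1 x hx hc
    have hm2 : PySem.Int.mod n 2 = n % 2 := PySem.Int.mod_eq_emod_of_pos (by omega)
    rw [pow_mat_alt, dif_neg (by omega : ¬ n ≤ 0)]
    simp only []
    by_cases hn1 : n = 1
    · subst hn1
      have hq0 : PySem.Int.floordiv 1 2 = 0 := by
        rw [PySem.Int.floordiv_eq_ediv_of_pos (by omega)]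
        decide
      rw [hq0, if_pos (by rw [hm2]; omega : PySem.Int.mod 1 2 ≠ 0)]
      rw [show pow_mat_alt x 0 mod = pvIdent x.length by rw [pow_mat_alt, dif_pos (by omega)]]
      rw [pvMulMat_eq _ x, hc, pvMulMat_length, pvIdent_length]
      exact pvMkR_congr (fun i _ j hj => by omega)
    · have hq2 : PySem.Int.floordiv n 2 = n / 2 := PySem.Int.floordiv_eq_ediv_of_pos (by omega)
      rw [IH (PySem.Int.floordiv n 2).toNat (by omega) _ rfl (by omega) x hx hc]
      have hsq : pvMulMat (pvMkR x.length 0 fun _ _ => 0) (pvMkR x.length 0 fun _ _ => 0) mod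
          = pvMkR x.length 0 (fun _ _ => 0) := by
        rw [pvMulMat_eq, pvMkR_length, pvMkR_headD _ _ _ hx]
        exact pvMkR_congr (fun i _ j hj => by omega)
      rw [hsq]
      by_cases hodd : PySem.Int.mod n 2 ≠ 0
      · rw [if_pos hodd, pvMulMat_eq, hc, pvMkR_length]
        exact pvMkR_congr (fun i _ j hj => by omega)
      · rw [if_neg hodd]

-- A's loop computes res * xk^n (xk^n as pvPw xk mod (n.toNat - 1))
theorem pvLoopSpec (mod : Int) : ∀ (N : Nat) (n : Int), n.toNat = N → 1 ≤ n →
    ∀ (res xk : List (List Int)), 0 < xk.length →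
    (n = 1 ∨ ∀ l k, (xk.headD []).length ≤ k → k < xk.length → pvE xk l k = 0) →
    pvPowLoopA res xk n mod = pvMulMat res (pvPw xk mod (n.toNat - 1)) mod := by
  intro N
  induction N using Nat.strong_induction_on with
  | _ N IH =>
    intro n hN h1 res xk hxk hA
    rw [pvPowLoopA]
    by_cases h2 : 1 < n
    · rw [dif_pos h2]
      rcases hA with h | hA
      · omega
      have hq2 : PySem.Int.floordiv n 2 = n / 2 := PySem.Int.floordiv_eq_ediv_of_pos (by omega)
      have hm2 : PySem.Int.mod n 2 = n % 2 := PySem.Int.mod_eq_emod_of_pos (by omega)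
      have hql : (PySem.Int.floordiv n 2).toNat < N := by omega
      have hq1 : 1 ≤ PySem.Int.floordiv n 2 := by omega
      rw [IH (PySem.Int.floordiv n 2).toNat hql (PySem.Int.floordiv n 2) rfl hq1 _
          (pvMulMat xk xk mod) (by rw [pvMulMat_length]; exact hxk)
          (Or.inr (fun l k hk1 hk2 => by
            rw [pvMulMat_eq, pvE_mkR]
            rw [pvMulMat_headD _ _ _ hxk] at hk1
            rw [pvMulMat_length] at hk2
            rw [if_neg (fun h => by omega)]))]
      rw [pvPw_sq xk mod hxk hA]
      by_cases hodd : PySem.Int.mod n 2 ≠ 0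
      · rw [if_pos hodd]
        rw [pvAssoc res xk _ mod hxk
          (fun l k _ hk1 hk2 => hA l k hk1 (by rwa [pvPw_length] at hk2))]
        rw [show pvMulMat xk (pvPw xk mod (2 * ((PySem.Int.floordiv n 2).toNat - 1) + 1)) mod
            = pvPw xk mod (0 + (2 * ((PySem.Int.floordiv n 2).toNat - 1) + 1) + 1) from
          pvPw_add xk mod hxk hA 0 _]
        have he : 0 + (2 * ((PySem.Int.floordiv n 2).toNat - 1) + 1) + 1 = n.toNat - 1 := by omega
        rw [he]
      · rw [if_neg hodd]
        have he : 2 * ((PySem.Int.floordiv n 2).toNat - 1) + 1 = n.toNat - 1 := by omega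
        rw [he]
    · rw [dif_neg h2]
      have h0 : n.toNat - 1 = 0 := by omega
      rw [h0]
      rfl

-- B computes the masked power: identity * x^n
theorem pvAltSpec (mod : Int) : ∀ (N : Nat) (n : Int), n.toNat = N → 1 ≤ n →
    ∀ (x : List (List Int)), 0 < x.length →
    (n = 1 ∨ x.length ≤ (x.headD []).length) →
    pow_mat_alt x n mod
      = pvMask x.length ((x.headD []).length) (pvPw x mod (n.toNat - 1)) := by
  intro N
  induction N using Nat.strong_induction_on with
  | _ N IH =>
    intro n hN h1 x hx hD
    have hq2 : PySem.Int.floordiv n 2 = n / 2 := PySem.Int.floordiv_eq_ediv_of_pos (by omega)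
    have hm2 : PySem.Int.mod n 2 = n % 2 := PySem.Int.mod_eq_emod_of_pos (by omega)
    rw [pow_mat_alt, dif_neg (by omega : ¬ n ≤ 0)]
    simp only []
    by_cases hn1 : n = 1
    · subst hn1
      have hq0 : PySem.Int.floordiv 1 2 = 0 := by omega
      rw [hq0]
      rw [show pow_mat_alt x 0 mod = pvIdent x.length by rw [pow_mat_alt, dif_pos (by omega)]]
      rw [pvMulIdentL (pvIdent x.length) mod x.length (pvMkR_length _ _ _) hx]
      rw [pvIdent_headD _ hx, pvMask_ident]
      rw [if_pos (by rw [hm2]; omega : PySem.Int.mod 1 2 ≠ 0)]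
      rw [pvMulIdentL x mod x.length rfl hx]
      rfl
    · have hsc : x.length ≤ (x.headD []).length := by
        rcases hD with h | h
        · omega
        · exact h
      have hA : ∀ l k, (x.headD []).length ≤ k → k < x.length → pvE x l k = 0 := by
        intro l k hk1 hk2; omega
      have hq1 : 1 ≤ PySem.Int.floordiv n 2 := by omega
      have hql : (PySem.Int.floordiv n 2).toNat < N := by omega
      rw [IH (PySem.Int.floordiv n 2).toNat hql _ rfl hq1 x hx (Or.inr hsc)]
      have hPlen : (pvPw x mod ((PySem.Int.floordiv n 2).toNat - 1)).length = x.length :=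
        pvPw_length _ _ _
      have hPhead : ((pvPw x mod ((PySem.Int.floordiv n 2).toNat - 1)).headD []).length
          = (x.headD []).length := pvPw_headD _ _ hx _
      -- sq = mask (P q * P q) = mask (x^(2q-1))
      have hsq : pvMulMat
            (pvMask x.length ((x.headD []).length) (pvPw x mod ((PySem.Int.floordiv n 2).toNat - 1)))
            (pvMask x.length ((x.headD []).length) (pvPw x mod ((PySem.Int.floordiv n 2).toNat - 1))) mod
          = pvMask x.length ((x.headD []).length)
              (pvPw x mod (2 * ((PySem.Int.floordiv n 2).toNat - 1) + 1)) := by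
        conv_lhs => rw [← hPlen, ← hPhead]
        rw [pvMaskPushR _ _ mod (by rw [hPlen]; exact hx)]
        rw [pvMask_length]
        rw [pvMaskPushL _ _ mod
          (((pvPw x mod ((PySem.Int.floordiv n 2).toNat - 1)).headD []).length)
          (by rw [hPlen, hPhead]; exact hsc)]
        rw [pvMask_mask]
        rw [pvPw_add x mod hx hA]
        have he : (PySem.Int.floordiv n 2).toNat - 1 + ((PySem.Int.floordiv n 2).toNat - 1) + 1
            = 2 * ((PySem.Int.floordiv n 2).toNat - 1) + 1 := by omega
        rw [he, hPlen, hPhead]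
      rw [hsq]
      by_cases hodd : PySem.Int.mod n 2 ≠ 0
      · rw [if_pos hodd]
        conv_lhs => rw [show pvMask x.length ((x.headD []).length)
              (pvPw x mod (2 * ((PySem.Int.floordiv n 2).toNat - 1) + 1))
            = pvMask (pvPw x mod (2 * ((PySem.Int.floordiv n 2).toNat - 1) + 1)).length
                ((x.headD []).length)
                (pvPw x mod (2 * ((PySem.Int.floordiv n 2).toNat - 1) + 1)) by rw [pvPw_length]]
        rw [pvMaskPushL _ _ mod ((x.headD []).length) hsc]
        rw [pvPw_length]
        rw [show pvMulMat (pvPw x mod (2 * ((PySem.Int.floordiv n 2).toNat - 1) + 1)) x mod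
            = pvPw x mod (2 * ((PySem.Int.floordiv n 2).toNat - 1) + 1 + 1) from rfl]
        have he : 2 * ((PySem.Int.floordiv n 2).toNat - 1) + 1 + 1 = n.toNat - 1 := by omega
        rw [he]
      · rw [if_neg hodd]
        have he : 2 * ((PySem.Int.floordiv n 2).toNat - 1) + 1 = n.toNat - 1 := by omega
        rw [he]

theorem pvFinal : ∀ (x : List (List Int)) (n : Int) (mod : Int),
    Pre_pow_mat x n mod → pow_mat x n mod = pow_mat_alt x n mod := by
  intro x n mod hpre
  obtain ⟨hn, hcase⟩ := hpre
  by_cases h0 : n = 0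
  · subst h0
    rw [pow_mat, if_pos rfl, pow_mat_alt, dif_pos (by omega)]
  · rcases hcase with h0' | ⟨hne, _hrows, hdisj⟩
    · exact absurd h0' h0
    have hx : 0 < x.length := List.length_pos_iff.mpr hne
    have h1 : 1 ≤ n := by omega
    rw [pow_mat, if_neg h0]
    by_cases hc0 : (x.headD []).length = 0
    · rw [pvLoopZeroCols mod n.toNat n rfl h1 (pvIdent x.length) x hx hc0 (pvIdent_length _)]
      rw [pvAltZeroCols mod n.toNat n rfl h1 x hx hc0]
    · have hdisj' : n = 1 ∨ x.length ≤ (x.headD []).length := by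
        rcases hdisj with h | h | h
        · exact Or.inl h
        · exact Or.inr h
        · exact absurd h hc0
      rw [pvLoopSpec mod n.toNat n rfl h1 (pvIdent x.length) x hx
          (by rcases hdisj' with h | h
              · exact Or.inl h
              · exact Or.inr (fun l k hk1 hk2 => by omega))]
      rw [pvMulIdentL (pvPw x mod (n.toNat - 1)) mod x.length (pvPw_length _ _ _) hx]
      rw [pvPw_headD _ _ hx]
      rw [← pvAltSpec mod n.toNat n rfl h1 x hx hdisj']

-- ===== VERDICT (by name: the statement is the Claim_ definition above) =====
theorem pow_mat_spec : Claim_equal_pow_mat := by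
  intro x n mod _hdom hpre
  exact pvFinal x n mod hpre
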